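-- pv_equiv track=rewrite | github.com/bob686868/Leetcode-100-day-challenge- | day55.py | lc3623
-- ===== SOURCE A (Python) =====
-- def lc3623(points):
--         grps={}
--         for x,y in points:
--             if y not in grps:grps[y]=0
--             grps[y]+=1
--
--         total=0
--         res=0
--         for g in grps:
--             total+=(grps[g])*(grps[g]-1)//2
--
--         for g in grps:
--             curGrps=grps[g]*(grps[g]-1)//2
--             total-=curGrps
--             res+=total*curGrps
--
--         return res%(10**9+7)
-- ===== SOURCE B (Python) =====
-- def lc3623(points):
--     ys = sorted(y for _, y in points)
--     s = q = run = 0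
--     prev = None
--     for y in ys:
--         if prev == y:
--             run += 1
--         else:
--             c = run * (run - 1) // 2
--             s += c
--             q += c * c
--             run = 1
--         prev = y
--     c = run * (run - 1) // 2
--     s += c
--     q += c * c
--     return (s * s - q) // 2 % (10**9 + 7)
-- ===== Notes on version B (the rewrite author's own statement) =====
-- stated objective: alternative
-- what changed: Drops A's dict entirely: B sorts the y-values, computes each group's combination count by a run-length scan of the sorted list, accumulates S and sum of squares Q in that single scan, and returns the closed form (S^2 - Q)//2 mod 1e9+7 instead of A's running-suffix double pass over the dict.
import Mathlib
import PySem

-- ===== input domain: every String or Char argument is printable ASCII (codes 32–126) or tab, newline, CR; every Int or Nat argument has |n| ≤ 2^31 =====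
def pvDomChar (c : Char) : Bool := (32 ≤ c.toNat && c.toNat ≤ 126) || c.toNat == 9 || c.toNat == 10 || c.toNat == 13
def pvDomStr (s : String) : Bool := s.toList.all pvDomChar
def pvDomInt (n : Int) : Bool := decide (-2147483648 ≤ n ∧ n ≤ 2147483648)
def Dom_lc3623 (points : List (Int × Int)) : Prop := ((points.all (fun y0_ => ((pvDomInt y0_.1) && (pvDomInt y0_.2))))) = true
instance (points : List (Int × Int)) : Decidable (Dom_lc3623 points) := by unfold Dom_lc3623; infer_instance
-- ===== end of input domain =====

-- B drops A's dict: it sorts the y-values, gets each group size by a run-length scan,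
-- and returns the closed form (S^2 - Q)//2 mod 1e9+7; objective: alternative.

-- ===== PORT A =====
def lc3623 (points : List (Int × Int)) : Int :=
  -- grps={}; for x,y in points: if y not in grps: grps[y]=0; grps[y]+=1
  let grps : PySem.Dict Int Int :=
    points.foldl (fun d p =>
      let d := if d.contains p.2 then d else d.insert p.2 0
      d.insert p.2 (d.getD p.2 0 + 1)) PySem.Dict.empty
  -- total=0; for g in grps: total += grps[g]*(grps[g]-1)//2
  let total : Int :=
    grps.keys.foldl (fun t g =>
      t + PySem.Int.floordiv (grps.getD g 0 * (grps.getD g 0 - 1)) 2) 0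
  -- for g in grps: curGrps=…; total-=curGrps; res+=total*curGrps
  let tr : Int × Int :=
    grps.keys.foldl (fun s g =>
      let c := PySem.Int.floordiv (grps.getD g 0 * (grps.getD g 0 - 1)) 2
      (s.1 - c, s.2 + (s.1 - c) * c)) (total, 0)
  PySem.Int.mod tr.2 (10 ^ 9 + 7)

-- ===== PORT B =====
def lc3623_alt (points : List (Int × Int)) : Int :=
  -- ys = sorted(y for _, y in points)
  let ys := PySem.List.sorted (points.map (·.2)) (fun y => y) false
  -- s = q = run = 0; prev = None; for y in ys: …   (state (s, q, run, prev))
  let st : Int × Int × Int × Option Int :=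
    ys.foldl (fun st y =>
      if st.2.2.2 = some y then (st.1, st.2.1, st.2.2.1 + 1, some y)
      else
        let c := PySem.Int.floordiv (st.2.2.1 * (st.2.2.1 - 1)) 2
        (st.1 + c, st.2.1 + c * c, 1, some y)) (0, 0, 0, none)
  -- final flush of the last run, then (s*s - q)//2 % (10**9+7)
  let c := PySem.Int.floordiv (st.2.2.1 * (st.2.2.1 - 1)) 2
  let s := st.1 + c
  let q := st.2.1 + c * c
  PySem.Int.mod (PySem.Int.floordiv (s * s - q) 2) (10 ^ 9 + 7)

-- ===== PRECONDITION & SPEC =====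
def Spec_lc3623 (points : List (Int × Int)) (out : Int) : Prop := out = lc3623_alt points
instance (points : List (Int × Int)) (out : Int) : Decidable (Spec_lc3623 points out) := by unfold Spec_lc3623; infer_instance

-- ===== CLAIM (what is proved, stated in full; the proofs are below) =====
def Claim_equal_lc3623 : Prop := ∀ (points : List (Int × Int)), Dom_lc3623 points → Spec_lc3623 points (lc3623 points)

-- ===== LEMMAS AND PROOFS =====

-- f n = n*(n-1)//2, the per-group combination count
def pvF (n : Int) : Int := PySem.Int.floordiv (n * (n - 1)) 2

-- the list of per-group combination counts, one per distinct value of l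
def pvFList (l : List Int) : List Int :=
  (PySem.List.dedup l).map (fun g => pvF ((l.count g : Int)))

-- B's loop body, named for the proofs (the port inlines the same lambda)
def pvStep (st : Int × Int × Int × Option Int) (y : Int) : Int × Int × Int × Option Int :=
  if st.2.2.2 = some y then (st.1, st.2.1, st.2.2.1 + 1, some y)
  else
    let c := PySem.Int.floordiv (st.2.2.1 * (st.2.2.1 - 1)) 2
    (st.1 + c, st.2.1 + c * c, 1, some y)

theorem pvF_zero : pvF 0 = 0 := by decide

theorem pvStep_eq : (fun (st : Int × Int × Int × Option Int) (y : Int) =>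
      if st.2.2.2 = some y then (st.1, st.2.1, st.2.2.1 + 1, some y)
      else
        let c := PySem.Int.floordiv (st.2.2.1 * (st.2.2.1 - 1)) 2
        (st.1 + c, st.2.1 + c * c, 1, some y)) = pvStep := rfl


-- ---------- A-side lemmas ----------

-- the grouping step of A collapses to a plain counting insert
theorem pv_step_eq (d : PySem.Dict Int Int) (y : Int) :
    (let d' := if d.contains y then d else d.insert y 0
     d'.insert y (d'.getD y 0 + 1)) = d.insert y (d.getD y 0 + 1) := by
  by_cases h : d.contains y
  · simp [h]
  · simp only [h, Bool.false_eq_true, ite_false]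
    rw [PySem.Dict.getD_insert_self, PySem.Dict.insert_insert_self,
        PySem.Dict.getD_of_not_contains d 0 (by simpa using h)]

theorem pv_grps_eq (points : List (Int × Int)) :
    points.foldl (fun d p =>
      let d := if d.contains p.2 then d else d.insert p.2 0
      d.insert p.2 (d.getD p.2 0 + 1)) PySem.Dict.empty
    = PySem.Dict.counter (points.map (·.2)) := by
  have hfun : (fun (d : PySem.Dict Int Int) (p : Int × Int) =>
      let d := if d.contains p.2 then d else d.insert p.2 0
      d.insert p.2 (d.getD p.2 0 + 1))
      = fun d p => d.insert p.2 (d.getD p.2 0 + 1) := by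
    funext d p
    exact pv_step_eq d p.2
  rw [hfun]
  have h2 := PySem.Dict.foldl_insert_getD_add_one_eq_counter (points.map (·.2))
  rw [List.foldl_map] at h2
  exact h2

-- folding '+ f x' is the sum of the mapped list
theorem pv_foldl_sum {α : Type} (f : α → Int) :
    ∀ (l : List α) (t : Int), l.foldl (fun t x => t + f x) t = t + (l.map f).sum := by
  intro l
  induction l with
  | nil => simp
  | cons x xs ih => intro t; simp [ih]; ring

-- pairwise-product sum of a list
def pvE : List Int → Int
  | [] => 0
  | q :: qs => q * qs.sum + pvE qs

-- A's second loop: starting from total = sum + t it yields r + t*sum + pvE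
theorem pv_loop2 {α : Type} (f : α → Int) :
    ∀ (l : List α) (t r : Int),
      l.foldl (fun s x => (s.1 - f x, s.2 + (s.1 - f x) * f x)) ((l.map f).sum + t, r)
        = (t, r + t * (l.map f).sum + pvE (l.map f)) := by
  intro l
  induction l with
  | nil => intro t r; simp [pvE]
  | cons x l ih =>
      intro t r
      simp only [List.foldl_cons, List.map_cons, List.sum_cons, pvE]
      have h1 : f x + (l.map f).sum + t - f x = (l.map f).sum + t := by ring
      rw [h1, ih]
      simp only [Prod.mk.injEq]
      constructor
      · trivial
      · ring

-- algebraic identity: 2 * (pairwise-product sum) = S^2 - Q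
theorem pv_two_e (qs : List Int) :
    2 * pvE qs = qs.sum * qs.sum - (qs.map (fun c => c * c)).sum := by
  induction qs with
  | nil => simp [pvE]
  | cons q qs ih =>
      simp only [pvE, List.sum_cons, List.map_cons]
      nlinarith [ih]

theorem pv_fdiv_two (e : Int) : PySem.Int.floordiv (2 * e) 2 = e := by
  rw [PySem.Int.floordiv_eq_ediv_of_pos (by norm_num)]
  omega

-- A's value, in closed form over S and Q of the count list of l = ys of points
theorem pv_A_closed (points : List (Int × Int)) :
    lc3623 points
      = PySem.Int.mod (PySem.Int.floordiv
          ((pvFList (points.map (·.2))).sum * (pvFList (points.map (·.2))).sum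
            - ((pvFList (points.map (·.2))).map (fun c => c * c)).sum) 2) (10 ^ 9 + 7) := by
  unfold lc3623
  simp only [pv_grps_eq]
  set l := points.map (·.2) with hl
  have hkeys : (PySem.Dict.counter l).keys = PySem.List.dedup l := by
    rw [PySem.Dict.keys_counter]; simp
  have hq : (PySem.Dict.counter l).keys.map
        (fun g => PySem.Int.floordiv ((PySem.Dict.counter l).getD g 0
          * ((PySem.Dict.counter l).getD g 0 - 1)) 2) = pvFList l := by
    rw [hkeys]
    unfold pvFList pvF
    exact List.map_congr_left (fun g _ => by rw [PySem.Dict.getD_counter])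
  have htot := pv_foldl_sum
    (fun g => PySem.Int.floordiv ((PySem.Dict.counter l).getD g 0
        * ((PySem.Dict.counter l).getD g 0 - 1)) 2) (PySem.Dict.counter l).keys 0
  rw [zero_add] at htot
  rw [htot, hq]
  have hA := pv_loop2
    (fun g => PySem.Int.floordiv ((PySem.Dict.counter l).getD g 0
        * ((PySem.Dict.counter l).getD g 0 - 1)) 2) (PySem.Dict.counter l).keys 0 0
  rw [add_zero, hq] at hA
  rw [hA]
  simp only [zero_add, zero_mul]
  congr 1
  have := pv_two_e (pvFList l)
  rw [← pv_fdiv_two (pvE (pvFList l)), this]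

-- ---------- B-side lemmas ----------

-- incrementing through a replicate block whose value matches prev
theorem pv_rep (a : Int) :
    ∀ (m : Nat) (s q r : Int),
      (List.replicate m a).foldl pvStep (s, q, r, some a) = (s, q, r + m, some a) := by
  intro m
  induction m with
  | zero => intro s q r; simp
  | succ m ih =>
      intro s q r
      rw [List.replicate_succ, List.foldl_cons]
      show (List.replicate m a).foldl pvStep (pvStep (s, q, r, some a) a) = _
      have : pvStep (s, q, r, some a) a = (s, q, r + 1, some a) := by
        simp [pvStep]
      rw [this, ih]
      congr 1
      push_cast
      ring_nf

-- a run flush: on a head differing from prev, the state collapses to (flushed, none)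
theorem pv_flush (a b : Int) (hab : b ≠ a) (l : List Int) (s q r : Int) :
    (b :: l).foldl pvStep (s, q, r, some a)
      = (b :: l).foldl pvStep (s + pvF r, q + pvF r * pvF r, 0, none) := by
  simp only [List.foldl_cons]
  have h1 : pvStep (s, q, r, some a) b
      = (s + pvF r, q + pvF r * pvF r, 1, some b) := by
    simp [pvStep, pvF, hab.symm]
  have h2 : pvStep (s + pvF r, q + pvF r * pvF r, 0, none) b
      = (s + pvF r + pvF 0, q + pvF r * pvF r + pvF 0 * pvF 0, 1, some b) := by
    simp [pvStep, pvF]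
  rw [h1, h2, pvF_zero]
  norm_num

-- head of dropWhile fails the predicate
theorem pv_dropWhile_head {p : Int → Bool} :
    ∀ (t : List Int) (b : Int) (r : List Int), t.dropWhile p = b :: r → p b = false := by
  intro t
  induction t with
  | nil => intro b r h; simp at h
  | cons x xs ih =>
      intro b r h
      by_cases hx : p x
      · rw [List.dropWhile_cons_of_pos hx] at h; exact ih b r h
      · rw [List.dropWhile_cons_of_neg hx] at h
        cases h; simpa using hx

-- dedup of a replicate block followed by a disjoint rest, as a permutation
theorem pv_dedup_perm (a : Int) (k : Nat) (hk : 1 ≤ k) (rest : List Int) (ha : a ∉ rest) :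
    (PySem.List.dedup (List.replicate k a ++ rest)).Perm (a :: PySem.List.dedup rest) := by
  rw [List.perm_ext_iff_of_nodup (PySem.List.nodup_dedup _)
      (by simp [List.nodup_cons, ha])]
  intro x
  simp [List.mem_replicate]
  constructor
  · rintro (⟨_, h⟩ | h)
    · exact Or.inl h
    · exact Or.inr h
  · rintro (h | h)
    · exact Or.inl ⟨Nat.one_le_iff_ne_zero.mp hk, h⟩
    · exact Or.inr h

-- the count list of a replicate block ++ disjoint rest, as a permutation
theorem pv_flist_run (a : Int) (k : Nat) (hk : 1 ≤ k) (rest : List Int) (ha : a ∉ rest) :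
    (pvFList (List.replicate k a ++ rest)).Perm (pvF (k : Int) :: pvFList rest) := by
  unfold pvFList
  have h1 := (pv_dedup_perm a k hk rest ha).map
    (fun g => pvF (((List.replicate k a ++ rest).count g : Int)))
  refine h1.trans ?_
  simp only [List.map_cons]
  have hca : ((List.replicate k a ++ rest).count a : Int) = (k : Int) := by
    rw [List.count_append, List.count_replicate_self, List.count_eq_zero_of_not_mem ha]
    simp
  rw [hca]
  apply List.Perm.cons
  rw [List.map_congr_left]
  intro g hg
  have hgr : g ∈ rest := (PySem.List.mem_dedup _ _).mp hg
  have hga : g ≠ a := fun h => ha (h ▸ hgr)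
  congr 1
  simp [List.count_append, List.count_replicate, Ne.symm hga]

theorem pvFList_nil : pvFList [] = [] := rfl

-- main B-loop characterisation on a sorted list, by strong induction on length
theorem pv_main :
    ∀ (n : Nat) (l : List Int), l.length ≤ n → l.Pairwise (· ≤ ·) → ∀ (s q : Int),
      ((l.foldl pvStep (s, q, 0, none)).1 + pvF (l.foldl pvStep (s, q, 0, none)).2.2.1,
       (l.foldl pvStep (s, q, 0, none)).2.1
         + pvF (l.foldl pvStep (s, q, 0, none)).2.2.1
           * pvF (l.foldl pvStep (s, q, 0, none)).2.2.1)
      = (s + (pvFList l).sum, q + ((pvFList l).map (fun c => c * c)).sum) := by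
  intro n
  induction n with
  | zero =>
      intro l hl _ s q
      have : l = [] := List.eq_nil_of_length_eq_zero (Nat.le_zero.mp hl)
      subst this
      simp [pvFList, PySem.List.dedup, pvF_zero]
  | succ n ih =>
      intro l hl hsorted s q
      match l, hl, hsorted with
      | [], _, _ => simp [pvFList, PySem.List.dedup, pvF_zero]
      | a :: t, hl, hsorted =>
        set rest := t.dropWhile (fun x => x == a) with hrest
        set k : Nat := (t.takeWhile (fun x => x == a)).length + 1 with hk
        have htw : t.takeWhile (fun x => x == a)
            = List.replicate (t.takeWhile (fun x => x == a)).length a := by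
          apply List.eq_replicate_of_mem
          intro x hx
          simpa using List.mem_takeWhile_imp hx
        have hdecomp : a :: t = List.replicate k a ++ rest := by
          rw [hk, List.replicate_succ, List.cons_append, ← htw, hrest,
              List.takeWhile_append_dropWhile]
        have hrestsub : rest.Sublist t := hrest ▸ List.dropWhile_sublist _
        have hrestlen : rest.length ≤ n := by
          have h1 := hrestsub.length_le
          have h2 : t.length ≤ n := by simpa using hl
          omega
        have hrestsorted : rest.Pairwise (· ≤ ·) :=
          (List.pairwise_cons.mp hsorted).2.sublist hrestsub
        have ha_le : ∀ x ∈ t, a ≤ x := (List.pairwise_cons.mp hsorted).1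
        have ha_notin : a ∉ rest := by
          intro hmem
          cases hre : rest with
          | nil => rw [hre] at hmem; simp at hmem
          | cons b r' =>
            have hba : (b == a) = false := pv_dropWhile_head t b r' (by rw [← hrest]; exact hre)
            have hbne : b ≠ a := by simpa using hba
            have hab : a ≤ b := ha_le b (hrestsub.mem (hre ▸ List.mem_cons_self))
            have halt : a < b := lt_of_le_of_ne hab (fun h => hbne h.symm)
            rw [hre] at hmem
            rcases List.mem_cons.mp hmem with h | h
            · exact hbne h.symm
            · have : b ≤ a := (List.pairwise_cons.mp (hre ▸ hrestsorted)).1 a h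
              omega
        have hrep : (List.replicate k a).foldl pvStep (s, q, 0, none)
            = (s, q, (k : Int), some a) := by
          rw [hk, List.replicate_succ, List.foldl_cons]
          have h0 : pvStep (s, q, 0, none) a = (s, q, 1, some a) := by
            simp [pvStep]
          rw [h0, pv_rep]
          congr 1
          push_cast
          ring_nf
        have hperm := pv_flist_run a k (by omega) rest ha_notin
        have hsum : (pvFList (a :: t)).sum = pvF (k : Int) + (pvFList rest).sum := by
          rw [hdecomp, hperm.sum_eq]; simp
        have hsq : ((pvFList (a :: t)).map (fun c => c * c)).sum
            = pvF (k : Int) * pvF (k : Int)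
              + ((pvFList rest).map (fun c => c * c)).sum := by
          rw [hdecomp, (hperm.map (fun c => c * c)).sum_eq]; simp
        rw [hdecomp, List.foldl_append, hrep]
        cases hre : rest with
        | nil =>
            simp only [List.foldl_nil]
            rw [hre, List.append_nil] at hdecomp
            rw [List.append_nil, ← hdecomp, hsum, hsq, hre]
            simp only [pvFList_nil, List.map_nil, List.sum_nil, Prod.mk.injEq]
            constructor <;> ring
        | cons b r' =>
            have hba : (b == a) = false := pv_dropWhile_head t b r' (by rw [← hrest]; exact hre)
            have hbne : b ≠ a := by simpa using hba
            rw [pv_flush a b hbne r' s q (k : Int)]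
            have hih := ih (b :: r') (hre ▸ hrestlen) (hre ▸ hrestsorted)
              (s + pvF (k : Int)) (q + pvF (k : Int) * pvF (k : Int))
            rw [hih, ← hre, ← hdecomp, hsum, hsq, hre]
            simp only [Prod.mk.injEq]
            constructor <;> ring

-- B's value, in closed form over S and Q of the count list of sorted ys
theorem pv_B_closed (points : List (Int × Int)) :
    lc3623_alt points
      = PySem.Int.mod (PySem.Int.floordiv
          ((pvFList (PySem.List.sorted (points.map (·.2)) (fun y => y) false)).sum
             * (pvFList (PySem.List.sorted (points.map (·.2)) (fun y => y) false)).sum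
            - ((pvFList (PySem.List.sorted (points.map (·.2)) (fun y => y) false)).map
                (fun c => c * c)).sum) 2) (10 ^ 9 + 7) := by
  unfold lc3623_alt
  rw [pvStep_eq]
  set ys := PySem.List.sorted (points.map (·.2)) (fun y => y) false with hys
  have hmain := pv_main ys.length ys le_rfl
    (by simpa using PySem.List.sorted_pairwise (points.map (·.2)) (fun y => y)) 0 0
  have h1 := congrArg Prod.fst hmain
  have h2 := congrArg Prod.snd hmain
  simp only at h1 h2
  rw [show (0:Int) + (pvFList ys).sum = (pvFList ys).sum from by ring] at h1
  rw [show (0:Int) + ((pvFList ys).map (fun c => c * c)).sum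
      = ((pvFList ys).map (fun c => c * c)).sum from by ring] at h2
  simp only [pvF] at h1 h2
  dsimp only
  rw [h1, h2]

-- the count lists of two permuted lists are permutations of each other
theorem pv_flist_perm (l₁ l₂ : List Int) (hp : l₁.Perm l₂) :
    (pvFList l₁).Perm (pvFList l₂) := by
  unfold pvFList
  have hd : (PySem.List.dedup l₁).Perm (PySem.List.dedup l₂) := by
    rw [List.perm_ext_iff_of_nodup (PySem.List.nodup_dedup _) (PySem.List.nodup_dedup _)]
    intro x
    simp [hp.mem_iff]
  have := hd.map (fun g => pvF ((l₁.count g : Int)))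
  refine this.trans ?_
  rw [List.map_congr_left]
  intro g _
  rw [hp.count_eq]

theorem lc3623_spec : Claim_equal_lc3623 := by
  intro points _
  unfold Spec_lc3623
  rw [pv_A_closed, pv_B_closed]
  have hp := pv_flist_perm _ _
    (PySem.List.sorted_perm (points.map (·.2)) (fun y => y) false)
  rw [hp.sum_eq, (hp.map (fun c => c * c)).sum_eq]
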